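-- pv_equiv track=rewrite | github.com/ASSERT-KTH/Mokav | experiments/pynguin/c4b/return-lst/generated_tests/src_588/2/src_588.py | func
-- ===== SOURCE A (Python) =====
-- def func(*args):
-- 	ret_values = []
--
-- 	a = args[0]
-- 	b = ['h', 'e', 'l', 'l', 'o']
-- 	c = 0
-- 	d = 0
-- 	for i in a:
-- 	    if (b[c] == i):
-- 	        c = (c + 1)
-- 	        if (c == 5):
-- 	            break
-- 	if (c == 5):
-- 	    ret_values.append('YES')
-- 	else:
-- 	    ret_values.append('NO')
--
-- 	return ret_values
-- ===== SOURCE B (Python) =====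
-- def func(*args):
--     need = list('hello')
--     for x in reversed(args[0]):
--         if need and x == need[-1]:
--             need.pop()
--     return ['YES' if not need else 'NO']
-- ===== Notes on version B (the rewrite author's own statement) =====
-- stated objective: alternative
-- what changed: B scans the input BACKWARDS, maintaining a stack of still-needed pattern characters that it pops from the end ('o' matched first), instead of A's forward scan with an advancing pattern index; correctness rests on subsequence existence being reversal-invariant.
import Mathlib
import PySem

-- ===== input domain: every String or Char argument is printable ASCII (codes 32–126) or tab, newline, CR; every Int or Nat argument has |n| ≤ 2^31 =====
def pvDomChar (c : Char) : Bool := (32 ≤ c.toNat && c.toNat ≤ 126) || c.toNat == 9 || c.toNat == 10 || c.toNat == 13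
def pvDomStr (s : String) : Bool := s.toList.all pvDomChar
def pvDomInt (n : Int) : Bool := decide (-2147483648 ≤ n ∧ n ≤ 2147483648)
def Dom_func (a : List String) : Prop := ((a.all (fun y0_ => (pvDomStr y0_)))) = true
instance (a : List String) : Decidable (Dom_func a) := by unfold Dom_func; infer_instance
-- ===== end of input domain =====

-- B: backward scan of the input with a stack of still-needed pattern characters popped from the
-- end ('o' matched first), instead of A's forward scan with an advancing pattern index.


-- ===== PORT A =====
-- A's loop: for i in a, if b[c] == i then c := c + 1, break when c = 5.
def funcLoopA : List String → Nat → Nat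
  | [], c => c
  | i :: rest, c =>
    if PySem.List.pyGet? (["h", "e", "l", "l", "o"] : List String) (c : Int) = some i then
      if c + 1 = 5 then 5 else funcLoopA rest (c + 1)
    else funcLoopA rest c

def func (a : List String) : List String :=
  if funcLoopA a 0 = 5 then ["YES"] else ["NO"]

-- ===== PORT B =====
-- fold over reversed(a); 'need and x == need[-1]' is need.getLast? = some x; need.pop() drops the last.
def func_alt (a : List String) : List String :=
  if a.reverse.foldl (fun need x => if need.getLast? = some x then need.dropLast else need)
      (["h", "e", "l", "l", "o"] : List String) = [] then ["YES"] else ["NO"]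

-- ===== PRECONDITION & SPEC =====
def Spec_func (a : List String) (out : List String) : Prop := out = func_alt a
instance (a : List String) (out : List String) : Decidable (Spec_func a out) := by unfold Spec_func; infer_instance

-- ===== CLAIM =====
def Claim_equal_func : Prop := ∀ (a : List String), Dom_func a → Spec_func a (func a)

-- ===== LEMMAS AND PROOFS =====
-- skipping a mismatching head preserves sublist-hood
theorem sublist_cons_of_ne (p x : String) (ps l : List String) (h : p ≠ x) :
    List.Sublist (p :: ps) (x :: l) ↔ List.Sublist (p :: ps) l := by
  constructor
  · intro hs
    cases hs with
    | cons _ h' => exact h'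
    | cons₂ => exact absurd rfl h
  · exact List.Sublist.cons x

-- B's fold empties the stack iff need.reverse is a subsequence of l
theorem foldB_eq_nil (l : List String) : ∀ need : List String,
    (l.foldl (fun need x => if need.getLast? = some x then need.dropLast else need) need = [])
      ↔ List.Sublist need.reverse l := by
  induction l with
  | nil =>
    intro need
    simp [List.foldl]
  | cons x xs ih =>
    intro need
    simp only [List.foldl]
    by_cases h : need.getLast? = some x
    · obtain ⟨ys, rfl⟩ := List.getLast?_eq_some_iff.mp h
      rw [if_pos h, List.dropLast_concat]
      simp only [List.reverse_append, List.reverse_cons, List.reverse_nil, List.nil_append,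
        List.cons_append, List.nil_append]
      rw [List.cons_sublist_cons]
      exact ih ys
    · rw [if_neg h]
      rw [ih need]
      cases hr : need.reverse with
      | nil => simp
      | cons p ps =>
        have hp : p ≠ x := by
          intro hpx
          apply h
          rw [← List.head?_reverse, hr, hpx]
          rfl
        exact (sublist_cons_of_ne p x ps xs hp).symm

theorem hello_get (c : Nat) (hc : c < 5) :
    PySem.List.pyGet? (["h","e","l","l","o"] : List String) (c : Int)
      = ((["h","e","l","l","o"] : List String).drop c).head? := by
  interval_cases c <;> rfl

-- A's loop reaches 5 iff the remaining pattern is a subsequence of the remaining input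
theorem funcLoop_eq_sublist (a : List String) : ∀ c : Nat, c < 5 →
    ((funcLoopA a c = 5) ↔ List.Sublist ((["h","e","l","l","o"] : List String).drop c) a) := by
  induction a with
  | nil =>
    intro c hc
    interval_cases c <;> simp [funcLoopA]
  | cons i rest ih =>
    intro c hc
    obtain ⟨p, ps, hdrop⟩ : ∃ p ps, (["h","e","l","l","o"] : List String).drop c = p :: ps := by
      interval_cases c <;> exact ⟨_, _, rfl⟩
    have hps : ps = (["h","e","l","l","o"] : List String).drop (c + 1) := by
      have h1 := List.tail_drop (l := (["h","e","l","l","o"] : List String)) (i := c)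
      rw [hdrop] at h1
      rw [List.drop_succ_cons]
      simpa using h1
    simp only [funcLoopA, hello_get c hc, hdrop, List.head?, Option.some.injEq]
    by_cases h : p = i
    · subst h
      simp only [if_true]
      by_cases h5 : c + 1 = 5
      · have hnil : ps = [] := by rw [hps, h5]; rfl
        subst hnil
        simp [h5, List.cons_sublist_cons]
      · have hc1 : c + 1 < 5 := by omega
        simp only [if_neg h5]
        rw [List.cons_sublist_cons, hps]
        exact ih (c + 1) hc1
    · rw [if_neg h, sublist_cons_of_ne p i ps rest h, ← hdrop]
      exact ih c hc

-- ===== VERDICT =====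
theorem func_spec : Claim_equal_func := by
  intro a _
  unfold Spec_func func func_alt
  have hA := funcLoop_eq_sublist a 0 (by omega)
  have hB := foldB_eq_nil a.reverse (["h","e","l","l","o"] : List String)
  rw [List.reverse_sublist] at hB
  by_cases hc : funcLoopA a 0 = 5
  · rw [if_pos hc, if_pos (hB.mpr (hA.mp hc))]
  · have hb :
        (a.reverse.foldl (fun need x => if need.getLast? = some x then need.dropLast else need)
          (["h","e","l","l","o"] : List String)) ≠ [] := by
      intro he
      exact hc (hA.mpr (hB.mp he))
    rw [if_neg hc, if_neg hb]
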